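-- pv_equiv track=rewrite | github.com/joseangeldiazg/introduccion-programacion-data-science | Python/entrega1/ejercicio6.py | es_inversa
-- ===== SOURCE A (Python) =====
-- def es_inversa(palabra1,palabra2):
--     if len(palabra1)!=len(palabra2):
--         return False
--     else:
--         for i in range(len(palabra1)):
--             if palabra1[i]!=palabra2[-(i+1)]:
--                 return False
--     return True
-- ===== SOURCE B (Python) =====
-- def es_inversa(palabra1, palabra2):
--     return palabra1 == palabra2[::-1]
-- ===== Notes on version B (the rewrite author's own statement) =====
-- stated objective: simpler
-- what changed: Replaces the length guard and index-by-index loop comparing palabra1[i] against palabra2[-(i+1)] with a single bulk expression that materializes the reversed second string via slicing and compares it for equality with the first.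
import Mathlib
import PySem

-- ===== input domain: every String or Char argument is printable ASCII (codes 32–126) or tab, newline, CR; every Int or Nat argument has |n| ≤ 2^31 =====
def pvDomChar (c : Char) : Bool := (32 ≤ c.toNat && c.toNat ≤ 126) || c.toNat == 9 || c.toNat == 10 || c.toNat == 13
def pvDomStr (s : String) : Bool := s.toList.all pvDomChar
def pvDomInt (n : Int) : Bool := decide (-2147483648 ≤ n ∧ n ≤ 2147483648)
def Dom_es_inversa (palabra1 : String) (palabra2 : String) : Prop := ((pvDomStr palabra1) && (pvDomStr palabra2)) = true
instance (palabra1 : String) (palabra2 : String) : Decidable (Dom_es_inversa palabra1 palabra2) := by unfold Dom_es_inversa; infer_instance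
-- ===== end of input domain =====

-- B replaces A's index loop with one bulk comparison against the reversed string (objective: simpler).

-- ===== PORT A =====
-- length guard, then for i in range(len): compare palabra1[i] with palabra2[-(i+1)]
def es_inversa (palabra1 : String) (palabra2 : String) : Bool :=
  if palabra1.toList.length ≠ palabra2.toList.length then false
  else
    (List.range palabra1.toList.length).all (fun i =>
      PySem.Str.pyGet? palabra1 (i : Int) == PySem.Str.pyGet? palabra2 (-((i : Int) + 1)))

-- ===== PORT B =====
-- return palabra1 == palabra2[::-1]
def es_inversa_alt (palabra1 : String) (palabra2 : String) : Bool :=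
  some palabra1 == PySem.Str.slice? palabra2 none none (-1)

-- ===== PRECONDITION & SPEC =====
def Spec_es_inversa (palabra1 : String) (palabra2 : String) (out : Bool) : Prop := out = es_inversa_alt palabra1 palabra2
instance (palabra1 : String) (palabra2 : String) (out : Bool) : Decidable (Spec_es_inversa palabra1 palabra2 out) := by unfold Spec_es_inversa; infer_instance

-- ===== CLAIM (what is proved, stated in full; the proofs are below) =====
def Claim_equal_es_inversa : Prop := ∀ (palabra1 : String) (palabra2 : String), Dom_es_inversa palabra1 palabra2 → Spec_es_inversa palabra1 palabra2 (es_inversa palabra1 palabra2)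

-- ===== LEMMAS AND PROOFS =====

-- A's loop body, under the length guard, tests l1[i]? against l2.reverse[i]?
lemma loop_body_eq (l1 l2 : List Char) (hlen : l1.length = l2.length)
    (i : Nat) (hi : i < l1.length) :
    (PySem.List.pyGet? l1 (i : Int) == PySem.List.pyGet? l2 (-((i : Int) + 1)))
      = (l1[i]? == l2.reverse[i]?) := by
  have h1 : PySem.List.pyGet? l1 (i : Int) = l1[i]? := PySem.List.pyGet?_natCast l1 i
  have hk : -((i : Int) + 1) = -(((i + 1 : Nat) : Int)) := by push_cast; ring
  have h2 : PySem.List.pyGet? l2 (-(((i + 1 : Nat) : Int))) = l2[l2.length - (i + 1)]? :=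
    PySem.List.pyGet?_neg_natCast l2 (i + 1) (by omega) (by omega)
  have h3 : l2.reverse[i]? = l2[l2.length - 1 - i]? := by
    rw [List.getElem?_reverse (by omega)]
  have h4 : l2.length - (i + 1) = l2.length - 1 - i := by omega
  rw [h1, hk, h2, h3, h4]

lemma exists_of_ne' {l r : List Char} (h : l ≠ r) : ∃ i : Nat, l[i]? ≠ r[i]? := by
  by_contra hc
  push Not at hc
  exact h (List.ext_getElem? hc)

lemma all_congr' {α : Type} (l : List α) (p q : α → Bool)
    (h : ∀ x ∈ l, p x = q x) : l.all p = l.all q := by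
  induction l with
  | nil => rfl
  | cons a t ih =>
    simp only [List.all_cons, h a List.mem_cons_self,
      ih (fun x hx => h x (List.mem_cons_of_mem a hx))]

-- range-all of pointwise getElem? equality, with equal lengths, is list equality
lemma all_range_getElem?_eq (l r : List Char) (hlen : l.length = r.length) :
    ((List.range l.length).all (fun i => l[i]? == r[i]?)) = (l = r : Bool) := by
  by_cases h : l = r
  · subst h
    simp
  · simp only [h, decide_false]
    rw [List.all_eq_false]
    rcases exists_of_ne' h with ⟨i, hne⟩
    refine ⟨i, ?_, ?_⟩
    · by_cases hi : i < l.length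
      · exact List.mem_range.mpr hi
      · exfalso; apply hne
        rw [List.getElem?_eq_none (by omega), List.getElem?_eq_none (by omega)]
    · simp [hne]

-- ===== VERDICT (by name: the statement is the Claim_ definition above) =====
theorem es_inversa_spec : Claim_equal_es_inversa := by
  intro p1 p2 _
  unfold Spec_es_inversa es_inversa es_inversa_alt
  rw [PySem.Str.slice?_none_none_neg_one]
  have hrhs : (some p1 == some (String.ofList p2.toList.reverse))
      = (p1.toList = p2.toList.reverse : Bool) := by
    rw [Bool.eq_iff_iff]
    simp [String.ext_iff]
  rw [hrhs]
  split_ifs with h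
  · symm
    simp only [decide_eq_false_iff_not]
    intro hc
    exact h (by rw [hc, List.length_reverse])
  · push Not at h
    have key : ((List.range p1.toList.length).all (fun i =>
          PySem.Str.pyGet? p1 (i : Int) == PySem.Str.pyGet? p2 (-((i : Int) + 1))))
        = ((List.range p1.toList.length).all
            (fun i => p1.toList[i]? == p2.toList.reverse[i]?)) := by
      apply all_congr'
      intro i hi
      have hi' : i < p1.toList.length := List.mem_range.mp hi
      simpa using loop_body_eq p1.toList p2.toList h i hi'
    rw [key, all_range_getElem?_eq p1.toList p2.toList.reverse
      (by rw [List.length_reverse]; exact h)]
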